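-- pv_equiv track=rewrite | github.com/cristovao-n/ufcg-computer-science | 2024.1/atal/listas-presenciais/lista-04/dfs.py | dfs
-- ===== SOURCE A (Python) =====
-- def dfs_visit(vertex, graph, colors, parents, discovery_time, finish_time, deep):
--     colors[vertex] = "GRAY"
--     discovery_time[0] += 1
--     finish_time[vertex] = None
--     returned_deep = 0
--     for adj in graph[vertex]:
--         if colors[adj] == "WHITE":
--             parents[adj] = vertex
--             returned_deep = max(
--                 returned_deep,
--                 dfs_visit(
--                     adj, graph, colors, parents, discovery_time, finish_time, deep + 1
--                 ),
--             )
--     colors[vertex] = "BLACK"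
--     discovery_time[0] += 1
--     finish_time[vertex] = discovery_time[0]
--     return max(returned_deep, deep)
--
-- def dfs(graph, start):
--     vertices = list(graph.keys())
--     colors = {}
--     parent = {}
--     discovery_time = [0]
--     finish_time = {}
--
--     for vertex in vertices:
--         colors[vertex] = "WHITE"
--         parent[vertex] = None
--
--     deep = dfs_visit(start, graph, colors, parent, discovery_time, finish_time, 1)
--
--     return deep
-- ===== SOURCE B (Python) =====
-- def dfs(graph, start):
--     visited = {start}
--     best = 1
--     stack = [(start, graph[start], 1)]
--     while stack:
--         v, rest, d = stack.pop()
--         if rest: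
--             a, remaining = rest[0], rest[1:]
--             stack.append((v, remaining, d))
--             if a not in visited:
--                 visited.add(a)
--                 if d + 1 > best:
--                     best = d + 1
--                 stack.append((a, graph[a], d + 1))
--     return best
-- ===== Notes on version B (the rewrite author's own statement) =====
-- stated objective: alternative
-- what changed: Replaces A's recursive dfs_visit (with colors/parents/discovery_time/finish_time dictionaries) by an iterative traversal over an explicit stack of (vertex, remaining-adjacency, depth) frames that keeps only a visited set and a running maximum depth.
import Mathlib
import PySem

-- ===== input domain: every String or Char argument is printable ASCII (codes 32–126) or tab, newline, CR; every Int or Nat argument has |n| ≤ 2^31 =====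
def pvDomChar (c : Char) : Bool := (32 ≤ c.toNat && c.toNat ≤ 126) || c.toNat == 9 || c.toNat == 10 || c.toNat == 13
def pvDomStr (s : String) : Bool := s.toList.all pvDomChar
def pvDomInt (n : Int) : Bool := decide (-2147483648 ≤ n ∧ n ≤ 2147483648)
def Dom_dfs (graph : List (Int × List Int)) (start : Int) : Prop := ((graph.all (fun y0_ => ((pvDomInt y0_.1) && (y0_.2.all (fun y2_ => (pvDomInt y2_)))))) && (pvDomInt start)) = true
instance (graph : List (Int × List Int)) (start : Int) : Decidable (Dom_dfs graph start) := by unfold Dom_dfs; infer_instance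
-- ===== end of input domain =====

-- B replaces A's recursive DFS (with its colors/parents/discovery/finish bookkeeping) by an
-- iterative explicit-stack traversal keeping only a visited set and a running maximum depth.

-- ===== PORT A =====
-- mutable state of A's dfs_visit: (colors, parents, discovery_time[0], finish_time)
-- fuel is a totality guard only (the recursion depth is bounded by the number of WHITE keys).
mutual
def dfsVisitA (G : PySem.Dict Int (List Int)) : Nat → Int → (PySem.Dict Int String × PySem.Dict Int (Option Int) × Int × PySem.Dict Int (Option Int)) → Int → Option (Int × (PySem.Dict Int String × PySem.Dict Int (Option Int) × Int × PySem.Dict Int (Option Int)))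
  | 0, _, _, _ => none
  | fuel+1, v, (c, p, dt, ft), deep =>
    match G.get? v with                                    -- graph[vertex] (KeyError = none)
    | none => none
    | some adjs => dfsGoA G fuel v deep adjs 0 (c.insert v "GRAY", p, dt + 1, ft.insert v none)
  termination_by fuel v st d => (fuel, 0, 0)
def dfsGoA (G : PySem.Dict Int (List Int)) : Nat → Int → Int → List Int → Int → (PySem.Dict Int String × PySem.Dict Int (Option Int) × Int × PySem.Dict Int (Option Int)) → Option (Int × (PySem.Dict Int String × PySem.Dict Int (Option Int) × Int × PySem.Dict Int (Option Int)))
  | _, v, deep, [], rd, (c, p, dt, ft) =>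
      some (max rd deep, (c.insert v "BLACK", p, dt + 1, ft.insert v (some (dt + 1))))
  | fuel, v, deep, a :: rest, rd, (c, p, dt, ft) =>
      match c.get? a with                                  -- colors[adj] (KeyError = none)
      | none => none
      | some col =>
        if col = "WHITE" then
          match dfsVisitA G fuel a (c, p.insert a (some v), dt, ft) (deep + 1) with
          | none => none
          | some (r, st) => dfsGoA G fuel v deep rest (max rd r) st
        else dfsGoA G fuel v deep rest rd (c, p, dt, ft)
  termination_by fuel v deep rest rd st => (fuel, 1, rest.length)
end

def dfs (graph : List (Int × List Int)) (start : Int) : Int :=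
  let G := PySem.Dict.ofList graph
  let vertices := G.keys
  let colors := vertices.foldl (fun c x => c.insert x "WHITE") PySem.Dict.empty
  let parent := vertices.foldl (fun p x => p.insert x (none : Option Int)) PySem.Dict.empty
  match dfsVisitA G (vertices.length + 1) start (colors, parent, 0, PySem.Dict.empty) 1 with
  | some (d, _) => d
  | none => 0

-- ===== PORT B =====
-- explicit stack of frames (vertex, remaining adjacency, depth); fuel is a totality guard only.
def bloopB (G : PySem.Dict Int (List Int)) : Nat → List (Int × List Int × Int) → PySem.Set Int → Int → Option Int
  | 0, _, _, _ => none
  | _+1, [], _, best => some best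
  | fuel+1, (v, rest, d) :: stk, visited, best =>
    match rest with
    | [] => bloopB G fuel stk visited best
    | a :: remaining =>
      if PySem.Set.contains visited a then bloopB G fuel ((v, remaining, d) :: stk) visited best
      else
        match G.get? a with                                -- graph[a] (KeyError = none)
        | none => none
        | some aadj =>
          bloopB G fuel ((a, aadj, d + 1) :: (v, remaining, d) :: stk)
            (PySem.Set.add visited a) (max best (d + 1))

def dfs_alt (graph : List (Int × List Int)) (start : Int) : Int :=
  let G := PySem.Dict.ofList graph
  match G.get? start with
  | none => 0
  | some adj0 =>
    match bloopB G (adj0.length + 2 + ((G.keys.map (fun x => (G.getD x []).length + 1)).sum))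
        [(start, adj0, 1)] (PySem.Set.add PySem.Set.empty start) 1 with
    | some b => b
    | none => 0

-- ===== PRECONDITION & SPEC =====
-- helpers for Pre_: the set of vertices reachable from start through edges between present keys
def reachStep (G : PySem.Dict Int (List Int)) (S : List Int) : List Int :=
  S.foldl (fun acc v => (G.getD v []).foldl
    (fun acc a => if G.contains a && !acc.contains a then acc ++ [a] else acc) acc) S

def reachSet (G : PySem.Dict Int (List Int)) (s : Int) : List Int :=
  (reachStep G)^[G.keys.length] [s]

-- Pre_ excludes exactly the inputs where the Python A raises KeyError: start absent from the dict,
-- or some vertex reachable from start (via edges between present keys) having a neighbour key absent.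
def Pre_dfs (graph : List (Int × List Int)) (start : Int) : Prop :=
  (PySem.Dict.ofList graph).contains start = true ∧
  ∀ v ∈ reachSet (PySem.Dict.ofList graph) start,
    ∀ a ∈ (PySem.Dict.ofList graph).getD v [], (PySem.Dict.ofList graph).contains a = true
instance (graph : List (Int × List Int)) (start : Int) : Decidable (Pre_dfs graph start) := by
  unfold Pre_dfs; infer_instance

def pvWitness_dfs : (List (Int × List Int)) × Int := ([(0, [1, 2]), (1, [0, 2]), (2, [])], 0)

def Spec_dfs (graph : List (Int × List Int)) (start : Int) (out : Int) : Prop := out = dfs_alt graph start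
instance (graph : List (Int × List Int)) (start : Int) (out : Int) : Decidable (Spec_dfs graph start out) := by unfold Spec_dfs; infer_instance

-- ===== CLAIM (what is proved, stated in full; the proofs are below) =====
def Claim_equal_dfs : Prop := ∀ (graph : List (Int × List Int)) (start : Int), Dom_dfs graph start → Pre_dfs graph start → Spec_dfs graph start (dfs graph start)

-- ===== LEMMAS AND PROOFS =====

-- colors ↔ visited-set correspondence: x is WHITE iff it is an unvisited key; x is coloured iff key or visited
def RepC (K : List Int) (c : PySem.Dict Int String) (V : List Int) : Prop :=
  ∀ x : Int, (c.get? x = some "WHITE" ↔ (x ∈ K ∧ x ∉ V)) ∧ ((c.get? x).isSome ↔ (x ∈ K ∨ x ∈ V))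

-- number of unvisited keys (bounds A's recursion depth)
def muN (K V : List Int) : Nat := K.countP (fun x => decide (x ∉ V))
-- remaining frame-step budget of B's loop
def muC (G : PySem.Dict Int (List Int)) (V : List Int) : Nat :=
  ((G.keys.filter (fun x => decide (x ∉ V))).map (fun x => (G.getD x []).length + 1)).sum

lemma filter_update_perm (L : List Int) (hnd : L.Nodup) (a : Int) (ha : a ∈ L) (V : List Int)
    (hav : a ∉ V) :
    List.Perm (L.filter (fun x => decide (x ∉ V))) (a :: L.filter (fun x => decide (x ∉ V ++ [a]))) := by
  induction L with
  | nil => cases ha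
  | cons b T ih =>
    rcases List.nodup_cons.mp hnd with ⟨hbT, hndT⟩
    by_cases hba : b = a
    · subst hba
      have h1 : List.filter (fun x => decide (x ∉ V)) T
          = List.filter (fun x => decide (x ∉ V ++ [b])) T := by
        apply List.filter_congr
        intro x hx
        have hxb : x ≠ b := fun h => hbT (h ▸ hx)
        simp [List.mem_append, hxb]
      rw [List.filter_cons_of_pos (by simpa using hav),
          List.filter_cons_of_neg (by simp [List.mem_append]), h1]
    · have haT : a ∈ T := by
        rcases List.mem_cons.mp ha with h | h
        · exact absurd h.symm hba
        · exact h
      by_cases hbV : b ∈ V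
      · rw [List.filter_cons_of_neg (by simpa using hbV),
            List.filter_cons_of_neg (by simp [List.mem_append, hbV])]
        exact ih hndT haT
      · rw [List.filter_cons_of_pos (by simpa using hbV),
            List.filter_cons_of_pos (by simp [List.mem_append, hbV, hba])]
        exact ((ih hndT haT).cons b).trans (List.Perm.swap a b _)

lemma muN_add (K : List Int) (hnd : K.Nodup) (a : Int) (ha : a ∈ K) (V : List Int) (hav : a ∉ V) :
    muN K V = muN K (V ++ [a]) + 1 := by
  unfold muN
  rw [List.countP_eq_length_filter, List.countP_eq_length_filter,
    (filter_update_perm K hnd a ha V hav).length_eq]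
  simp [Nat.add_comm]

lemma muC_add (G : PySem.Dict Int (List Int)) (hnd : G.keys.Nodup) (a : Int) (ha : a ∈ G.keys)
    (V : List Int) (hav : a ∉ V) : muC G V = muC G (V ++ [a]) + ((G.getD a []).length + 1) := by
  unfold muC
  rw [((filter_update_perm G.keys hnd a ha V hav).map (fun x => (G.getD x []).length + 1)).sum_eq]
  simp [Nat.add_comm]

lemma muN_mono (K V V' : List Int) (h : ∀ x ∈ V, x ∈ V') : muN K V' ≤ muN K V := by
  unfold muN
  apply List.countP_mono_left
  intro x _ hx
  simp only [decide_eq_true_eq] at hx ⊢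
  exact fun hxV => hx (h x hxV)

lemma sum_filter_le (L : List Int) (f : Int → Nat) (p q : Int → Bool)
    (h : ∀ x ∈ L, p x = true → q x = true) :
    ((L.filter p).map f).sum ≤ ((L.filter q).map f).sum := by
  induction L with
  | nil => simp
  | cons b T ih =>
    have ih' := ih (fun x hx => h x (List.mem_cons_of_mem b hx))
    by_cases hp : p b = true
    · have hq := h b (List.mem_cons_self) hp
      rw [List.filter_cons_of_pos hp, List.filter_cons_of_pos hq]
      simp only [List.map_cons, List.sum_cons]
      omega
    · rw [List.filter_cons_of_neg (by simpa using hp)]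
      by_cases hq : q b = true
      · rw [List.filter_cons_of_pos hq]
        simp only [List.map_cons, List.sum_cons]
        omega
      · rw [List.filter_cons_of_neg (by simpa using hq)]
        exact ih'

lemma muC_le_sum (G : PySem.Dict Int (List Int)) (V : List Int) :
    muC G V ≤ ((G.keys.map (fun x => (G.getD x []).length + 1)).sum) := by
  have h := sum_filter_le G.keys (fun x => (G.getD x []).length + 1)
      (fun x => decide (x ∉ V)) (fun _ => true) (fun _ _ _ => rfl)
  simpa [muC, List.filter_true] using h

lemma set_add_of_not_mem (V : PySem.Set Int) (a : Int) (h : a ∉ V) :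
    PySem.Set.add V a = V ++ [a] := by
  have hc : PySem.Set.contains V a = false := by
    rw [← Bool.not_eq_true, PySem.Set.contains_iff]
    exact h
  simp [PySem.Set.add, h]

lemma set_contains_false (V : PySem.Set Int) (a : Int) (h : a ∉ V) :
    PySem.Set.contains V a = false := by
  rw [← Bool.not_eq_true, PySem.Set.contains_iff]; exact h

lemma bloopB_mono (G : PySem.Dict Int (List Int)) :
    ∀ (f : Nat) (s : List (Int × List Int × Int)) (vis : PySem.Set Int) (b r : Int),
      bloopB G f s vis b = some r → ∀ f', f ≤ f' → bloopB G f' s vis b = some r := by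
  intro f
  induction f with
  | zero => intro s vis b r h; simp [bloopB] at h
  | succ f ih =>
    intro s vis b r h f' hf'
    obtain ⟨f'', rfl⟩ : ∃ f'', f' = f'' + 1 := ⟨f' - 1, by omega⟩
    have hff : f ≤ f'' := by omega
    match s with
    | [] => simpa [bloopB] using h
    | (v, [], d) :: stk =>
      simp only [bloopB] at h ⊢
      exact ih _ _ _ _ h _ hff
    | (v, a :: rem, d) :: stk =>
      simp only [bloopB] at h ⊢
      by_cases hc : PySem.Set.contains vis a
      · simp only [hc, if_true] at h ⊢
        exact ih _ _ _ _ h _ hff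
      · simp only [hc, Bool.false_eq_true, if_false] at h ⊢
        cases hg : G.get? a with
        | none => rw [hg] at h; simp at h
        | some aadj =>
          rw [hg] at h
          exact ih _ _ _ _ h _ hff

-- the simulation statement for A's dfs_visit at a given fuel
def SimStmt (G : PySem.Dict Int (List Int)) (fa : Nat) : Prop :=
  ∀ (v : Int) (c : PySem.Dict Int String) (p : PySem.Dict Int (Option Int)) (dt : Int)
    (ft : PySem.Dict Int (Option Int)) (d : Int) (adjs : List Int) (visited : PySem.Set Int),
    G.get? v = some adjs → v ∈ visited → RepC G.keys (c.insert v "GRAY") visited →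
    muN G.keys visited < fa → 0 ≤ d →
    (dfsVisitA G fa v (c, p, dt, ft) d = none →
      ∃ k : Nat, ∀ (fb : Nat) (stk : List (Int × List Int × Int)) (best : Int),
        bloopB G (k + fb) ((v, adjs, d) :: stk) visited best = none) ∧
    (∀ r st', dfsVisitA G fa v (c, p, dt, ft) d = some (r, st') →
      ∃ (visited' : PySem.Set Int) (k : Nat),
        (∀ x ∈ visited, x ∈ visited') ∧ (∀ x ∈ visited', x ∈ visited ∨ x ∈ G.keys) ∧
        RepC G.keys st'.1 visited' ∧ d ≤ r ∧
        k + muC G visited' ≤ adjs.length + 1 + muC G visited ∧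
        ∀ (fb : Nat) (stk : List (Int × List Int × Int)) (best : Int), d ≤ best →
          bloopB G (k + fb) ((v, adjs, d) :: stk) visited best =
          bloopB G fb stk visited' (max best r))

-- the inner-loop simulation: processing the remaining adjacency list `rest`
lemma go_sim (G : PySem.Dict Int (List Int)) (hnd : G.keys.Nodup) (fa : Nat) (ihfa : SimStmt G fa) :
    ∀ (rest : List Int) (v d rd : Int) (c : PySem.Dict Int String) (p : PySem.Dict Int (Option Int))
      (dt : Int) (ft : PySem.Dict Int (Option Int)) (visited : PySem.Set Int),
    v ∈ visited → RepC G.keys c visited → muN G.keys visited ≤ fa → 0 ≤ d →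
    (dfsGoA G fa v d rest rd (c, p, dt, ft) = none →
      ∃ k : Nat, ∀ (fb : Nat) (stk : List (Int × List Int × Int)) (best : Int),
        bloopB G (k + fb) ((v, rest, d) :: stk) visited best = none) ∧
    (∀ r st', dfsGoA G fa v d rest rd (c, p, dt, ft) = some (r, st') →
      ∃ (visited' : PySem.Set Int) (k : Nat),
        (∀ x ∈ visited, x ∈ visited') ∧ (∀ x ∈ visited', x ∈ visited ∨ x ∈ G.keys) ∧
        RepC G.keys st'.1 visited' ∧ max rd d ≤ r ∧
        k + muC G visited' ≤ rest.length + 1 + muC G visited ∧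
        ∀ (fb : Nat) (stk : List (Int × List Int × Int)) (best : Int), d ≤ best → rd ≤ best →
          bloopB G (k + fb) ((v, rest, d) :: stk) visited best =
          bloopB G fb stk visited' (max best r)) := by
  intro rest v d
  induction rest with
  | nil =>
    intro rd c p dt ft visited hv hRep hmu hd0
    constructor
    · intro h; simp [dfsGoA] at h
    · intro r st' h
      simp only [dfsGoA, Option.some.injEq, Prod.mk.injEq] at h
      obtain ⟨hr, hst⟩ := h
      subst hst
      refine ⟨visited, 1, fun x hx => hx, fun x hx => Or.inl hx, ?_, le_of_eq hr, ?_, ?_⟩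
      · intro x
        simp only
        rw [PySem.Dict.get?_insert]
        by_cases hxv : x = v
        · subst hxv
          constructor
          · simp
            intro hK
            exact hv
          · simp [hv]
        · simp only [hxv, if_false]
          exact hRep x
      · simp
      · intro fb stk best hdb hrdb
        have hbr : max best r = best := by
          rw [← hr]; exact max_eq_left (max_le hrdb hdb)
        rw [hbr]
        have he : 1 + fb = fb + 1 := by omega
        rw [he]
        simp [bloopB]
  | cons a rest' ih =>
    intro rd c p dt ft visited hv hRep hmu hd0
    obtain ⟨hWa, hSa⟩ := hRep a
    cases hca : c.get? a with
    | none =>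
      have hor : ¬ (a ∈ G.keys ∨ a ∈ visited) := by rw [← hSa]; simp [hca]
      have hgaN : G.get? a = none :=
        (PySem.Dict.get?_eq_none_iff_not_mem_keys G a).mpr (fun h => hor (Or.inl h))
      have hnv : a ∉ visited := fun h => hor (Or.inr h)
      constructor
      · intro _
        refine ⟨1, fun fb stk best => ?_⟩
        have he : 1 + fb = fb + 1 := by omega
        rw [he]
        simp [bloopB, hgaN, hnv]
      · intro r st' h
        simp [dfsGoA, hca] at h
    | some col =>
      by_cases hcw : col = "WHITE"
      · subst hcw
        obtain ⟨haK, haV⟩ := hWa.mp hca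
        obtain ⟨aadj, hga⟩ : ∃ l, G.get? a = some l := by
          cases hg : G.get? a with
          | none => exact absurd ((PySem.Dict.get?_eq_none_iff_not_mem_keys G a).mp hg) (by simp [haK])
          | some l => exact ⟨l, rfl⟩
        have hadd := set_add_of_not_mem visited a haV
        have hcf := set_contains_false visited a haV
        have hRepC : RepC G.keys (c.insert a "GRAY") (visited ++ [a]) := by
          intro x
          rw [PySem.Dict.get?_insert]
          by_cases hxa : x = a
          · subst hxa
            constructor
            · simp
            · simp [haK]
          · simp only [hxa, if_false]
            obtain ⟨hW, hS⟩ := hRep x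
            constructor
            · rw [hW]; simp [List.mem_append, hxa]
            · rw [hS]; simp [List.mem_append, hxa]
        have hmuEq := muN_add G.keys hnd a haK visited haV
        have hmuC := muC_add G hnd a haK visited haV
        have hgetDa : G.getD a [] = aadj := by
          rw [PySem.Dict.getD_eq_get?_getD, hga]; rfl
        rw [hgetDa] at hmuC
        have hmuA : muN G.keys (visited ++ [a]) < fa := by omega
        have hchild := ihfa a c (p.insert a (some v)) dt ft (d + 1) aadj (visited ++ [a]) hga
          (by simp) hRepC hmuA (by omega)
        cases hvis : dfsVisitA G fa a (c, p.insert a (some v), dt, ft) (d + 1) with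
        | none =>
          obtain ⟨k₂, hk₂⟩ := hchild.1 hvis
          constructor
          · intro _
            refine ⟨k₂ + 1, fun fb stk best => ?_⟩
            have he : k₂ + 1 + fb = (k₂ + fb) + 1 := by omega
            rw [he]
            simp only [bloopB, hcf, Bool.false_eq_true, if_false, hga, hadd]
            exact hk₂ fb _ _
          · intro r st' h
            simp [dfsGoA, hca, hvis] at h
        | some pr =>
          obtain ⟨r₂, st₂⟩ := pr
          obtain ⟨c₂, p₂, dt₂, ft₂⟩ := st₂
          obtain ⟨vis₂, k₂, hsub₂, hcov₂, hRep₂, hdr₂, hk₂c, hblo₂⟩ := hchild.2 r₂ _ hvis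
          have hv₂ : v ∈ vis₂ := hsub₂ v (by simp [hv])
          have hmu₂ : muN G.keys vis₂ ≤ fa :=
            le_trans (muN_mono G.keys _ _ hsub₂) (by omega)
          have hirest := ih (max rd r₂) c₂ p₂ dt₂ ft₂ vis₂ hv₂ hRep₂ hmu₂ hd0
          constructor
          · intro h
            have h' : dfsGoA G fa v d rest' (max rd r₂) (c₂, p₂, dt₂, ft₂) = none := by
              simpa [dfsGoA, hca, hvis] using h
            obtain ⟨k₃, hk₃⟩ := hirest.1 h'
            refine ⟨1 + k₂ + k₃, fun fb stk best => ?_⟩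
            have he : 1 + k₂ + k₃ + fb = (k₂ + (k₃ + fb)) + 1 := by omega
            rw [he]
            simp only [bloopB, hcf, Bool.false_eq_true, if_false, hga, hadd]
            rw [hblo₂ (k₃ + fb) _ _ (le_max_right best (d + 1))]
            exact hk₃ fb stk _
          · intro r st' h
            have h' : dfsGoA G fa v d rest' (max rd r₂) (c₂, p₂, dt₂, ft₂) = some (r, st') := by
              simpa [dfsGoA, hca, hvis] using h
            obtain ⟨vis₃, k₃, hsub₃, hcov₃, hRep₃, hmax₃, hk₃c, hblo₃⟩ := hirest.2 r st' h'
            refine ⟨vis₃, 1 + k₂ + k₃, ?_, ?_, hRep₃, ?_, ?_, ?_⟩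
            · intro x hx
              exact hsub₃ x (hsub₂ x (by simp [hx]))
            · intro x hx
              rcases hcov₃ x hx with h3 | h3
              · rcases hcov₂ x h3 with h2 | h2
                · rcases List.mem_append.mp h2 with h1 | h1
                  · exact Or.inl h1
                  · have hxa : x = a := by simpa using h1
                    exact Or.inr (hxa ▸ haK)
                · exact Or.inr h2
              · exact Or.inr h3
            · exact le_trans (max_le_max (le_max_left rd r₂) (le_refl d)) hmax₃
            · simp only [List.length_cons]
              omega
            · intro fb stk best hdb hrdb
              have he : 1 + k₂ + k₃ + fb = (k₂ + (k₃ + fb)) + 1 := by omega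
              rw [he]
              simp only [bloopB, hcf, Bool.false_eq_true, if_false, hga, hadd]
              rw [hblo₂ (k₃ + fb) _ _ (le_max_right best (d + 1))]
              have hm1 : max (max best (d + 1)) r₂ = max best r₂ := by
                rw [max_assoc, max_eq_right hdr₂]
              rw [hm1]
              rw [hblo₃ fb stk (max best r₂) (le_trans hdb (le_max_left best r₂))
                (max_le_max hrdb (le_refl r₂))]
              have hr₂r : r₂ ≤ r :=
                le_trans (le_trans (le_max_right rd r₂) (le_max_left _ d)) hmax₃
              rw [max_assoc, max_eq_right hr₂r]
      · have haV : a ∈ visited := by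
          by_cases hK : a ∈ G.keys
          · by_contra hnin
            have h2 := hWa.mpr ⟨hK, hnin⟩
            rw [hca] at h2
            simp at h2
            exact hcw h2
          · rcases hSa.mp (by simp [hca]) with h | h
            · exact absurd h hK
            · exact h
        have hct : PySem.Set.contains visited a = true :=
          (PySem.Set.contains_iff visited a).mpr haV
        have hirest := ih rd c p dt ft visited hv hRep hmu hd0
        constructor
        · intro h
          have h' : dfsGoA G fa v d rest' rd (c, p, dt, ft) = none := by
            simpa [dfsGoA, hca, hcw] using h
          obtain ⟨k₃, hk₃⟩ := hirest.1 h'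
          refine ⟨k₃ + 1, fun fb stk best => ?_⟩
          have he : k₃ + 1 + fb = (k₃ + fb) + 1 := by omega
          rw [he]
          simp only [bloopB, hct, if_true]
          exact hk₃ fb stk best
        · intro r st' h
          have h' : dfsGoA G fa v d rest' rd (c, p, dt, ft) = some (r, st') := by
            simpa [dfsGoA, hca, hcw] using h
          obtain ⟨vis₃, k₃, hsub₃, hcov₃, hRep₃, hmax₃, hk₃c, hblo₃⟩ := hirest.2 r st' h'
          refine ⟨vis₃, k₃ + 1, hsub₃, hcov₃, hRep₃, hmax₃, ?_, ?_⟩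
          · simp only [List.length_cons]
            omega
          · intro fb stk best hdb hrdb
            have he : k₃ + 1 + fb = (k₃ + fb) + 1 := by omega
            rw [he]
            simp only [bloopB, hct, if_true]
            exact hblo₃ fb stk best hdb hrdb

lemma sim_all (G : PySem.Dict Int (List Int)) (hnd : G.keys.Nodup) : ∀ fa : Nat, SimStmt G fa := by
  intro fa
  induction fa with
  | zero =>
    intro v c p dt ft d adjs visited _ _ _ hmu
    exact absurd hmu (Nat.not_lt_zero _)
  | succ fa ih =>
    intro v c p dt ft d adjs visited hga hv hRep hmu hd0
    have hgo := go_sim G hnd fa ih adjs v d 0 (c.insert v "GRAY") p (dt + 1)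
      (ft.insert v none) visited hv hRep (Nat.lt_succ_iff.mp hmu) hd0
    constructor
    · intro h
      apply hgo.1
      simpa [dfsVisitA, hga] using h
    · intro r st' h
      have h' : dfsGoA G fa v d adjs 0 (c.insert v "GRAY", p, dt + 1, ft.insert v none)
          = some (r, st') := by simpa [dfsVisitA, hga] using h
      obtain ⟨vis', k, h1, h2, h3, h4, h5, h6⟩ := hgo.2 r st' h'
      refine ⟨vis', k, h1, h2, h3, le_trans (le_max_right 0 d) h4, h5, ?_⟩
      intro fb stk best hbest
      exact h6 fb stk best hbest (le_trans hd0 hbest)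

lemma colors_init_get? (l : List Int) (c0 : PySem.Dict Int String) (x : Int) :
    (l.foldl (fun c y => c.insert y "WHITE") c0).get? x =
      if x ∈ l then some "WHITE" else c0.get? x := by
  induction l generalizing c0 with
  | nil => simp
  | cons y ys ih =>
    simp only [List.foldl_cons]
    rw [ih]
    by_cases hys : x ∈ ys
    · simp [hys]
    · simp only [hys, if_false]
      rw [PySem.Dict.get?_insert]
      by_cases hxy : x = y
      · simp [hxy]
      · simp [hxy, hys]

-- ===== VERDICT (by name: the statement is the Claim_ definition above) =====
theorem dfs_spec : Claim_equal_dfs := by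
  intro graph start _hdom _hpre
  show dfs graph start = dfs_alt graph start
  simp only [dfs, dfs_alt]
  set G := PySem.Dict.ofList graph with hG
  have hnd : G.keys.Nodup := PySem.Dict.nodup_keys_ofList graph
  have hadd0 : PySem.Set.add PySem.Set.empty start = [start] := by
    rw [set_add_of_not_mem PySem.Set.empty start (by simp [PySem.Set.empty])]
    simp [PySem.Set.empty]
  cases hg0 : G.get? start with
  | none => simp [dfsVisitA, hg0]
  | some adj0 =>
    have hstart : start ∈ G.keys := by
      by_contra h
      have h2 := (PySem.Dict.get?_eq_none_iff_not_mem_keys G start).mpr h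
      rw [hg0] at h2
      simp at h2
    dsimp only
    set c0 := G.keys.foldl (fun c x => c.insert x "WHITE") PySem.Dict.empty with hc0
    set p0 := G.keys.foldl (fun p x => p.insert x (none : Option Int)) PySem.Dict.empty with hp0
    have hRep0 : RepC G.keys (c0.insert start "GRAY") [start] := by
      intro x
      rw [PySem.Dict.get?_insert]
      by_cases hxs : x = start
      · subst hxs
        constructor
        · simp
        · simp
      · simp only [hxs, if_false]
        rw [hc0, colors_init_get?]
        by_cases hxK : x ∈ G.keys
        · simp [hxK, hxs]
        · simp [hxK, hxs, PySem.Dict.get?_empty]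
    have hmu : muN G.keys [start] < G.keys.length + 1 := by
      have h := List.countP_le_length (p := fun x => decide (x ∉ ([start] : List Int)))
        (l := G.keys)
      unfold muN
      omega
    have hsim := sim_all G hnd (G.keys.length + 1) start c0 p0 0 PySem.Dict.empty 1 adj0
      [start] hg0 (by simp) hRep0 hmu (by norm_num)
    cases hva : dfsVisitA G (G.keys.length + 1) start (c0, p0, 0, PySem.Dict.empty) 1 with
    | none =>
      obtain ⟨k, hk⟩ := hsim.1 hva
      rw [hadd0]
      cases hb : bloopB G (adj0.length + 2 + ((G.keys.map (fun x => (G.getD x []).length + 1)).sum))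
          [(start, adj0, 1)] [start] 1 with
      | none => rfl
      | some b =>
        exfalso
        have hmono := bloopB_mono G _ _ _ _ _ hb
          (k + (adj0.length + 2 + ((G.keys.map (fun x => (G.getD x []).length + 1)).sum)))
          (by omega)
        rw [hk _ [] 1] at hmono
        simp at hmono
    | some pr =>
      obtain ⟨r, st'⟩ := pr
      obtain ⟨vis', k, hsub, hcov, hRep', hdr, hkc, hblo⟩ := hsim.2 r st' hva
      have h1 : bloopB G (k + 1) [(start, adj0, 1)] [start] 1 = some r := by
        rw [hblo 1 [] 1 (le_refl 1)]
        rw [max_eq_right hdr]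
        simp [bloopB]
      have h2 := muC_le_sum G [start]
      have hb := bloopB_mono G _ _ _ _ _ h1
        (adj0.length + 2 + ((G.keys.map (fun x => (G.getD x []).length + 1)).sum)) (by omega)
      rw [hadd0, hb]
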